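-- pv_equiv track=rewrite | github.com/RicemanBoy/iqpe | HPC/Upload/classes.py | __classical_error_correction__
-- ===== SOURCE A (Python) =====
-- def __classical_error_correction__(bits: list):
--     code0 = ['000110101', '110110110', '110110101', '110000000', '000110110', '101101101', '011101101', '011011000', '011011011', '110000011', '000000000', '011101110', '101011011', '101101110', '000000011', '101011000']
--     code1 = ['010100111', '010010001', '111111111', '001001010', '111001010', '001111111', '100010010', '111111100', '100100100', '100010001', '001001001', '010010010', '100100111', '111001001', '001111100', '010100100']
--     hmm = 0
--     for i,val in enumerate(bits):
--         for j in code0: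
--             diff = 0
--             for a,b in zip(val, j):
--                 if a!=b:
--                     diff += 1
--             if diff == 0:
--                 hmm += 1
--                 break
--             if diff == 1:
--                 bits[i] = j
--                 break
--         for j in code1:
--             diff = 0
--             for a,b in zip(val, j):
--                 if a!=b:
--                     diff += 1
--             if diff == 0:
--                 hmm += 1
--                 break
--             if diff == 1:
--                 bits[i] = j
--                 break
--     return bits
-- ===== SOURCE B (Python) =====
-- # Bit-parallel decoder: each codebook is preprocessed into 9 per-position
-- # char -> 16-bit-mask columns; one left-to-right pass over the input keeps, in two
-- # bitmask registers, the codewords matching exactly and those with at most one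
-- # mismatch, so a codeword is correct via dict lookups and word-wide AND/OR
-- # instead of comparing the input against all 32 codewords character by character.
-- # Mutates bits in place, like the function it replaces.
--
-- CODE0 = ['000110101', '110110110', '110110101', '110000000', '000110110', '101101101', '011101101', '011011000', '011011011', '110000011', '000000000', '011101110', '101011011', '101101110', '000000011', '101011000']
-- CODE1 = ['010100111', '010010001', '111111111', '001001010', '111001010', '001111111', '100010010', '111111100', '100100100', '100010001', '001001001', '010010010', '100100111', '111001001', '001111100', '010100100']
--
-- FULL = (1 << 16) - 1
--
--
-- def _columns(code):
--     cols = [{} for _ in range(9)]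
--     for k, w in enumerate(code):
--         for col, ch in zip(cols, w):
--             col[ch] = col.get(ch, 0) | (1 << k)
--     return cols
--
--
-- COLS0 = _columns(CODE0)
-- COLS1 = _columns(CODE1)
--
--
-- def _decode(val, cols):
--     """Earliest codeword index whose compared positions mismatch val at most
--     once, paired with whether the match is exact; None if there is none."""
--     exact = near = FULL
--     for ch, col in zip(val, cols):
--         x = col.get(ch, 0)
--         near = (near & x) | exact
--         exact &= x
--     k = next((k for k in range(16) if (near >> k) & 1), None)
--     if k is None:
--         return None
--     return k, (exact >> k) & 1 == 1
--
--
-- def __classical_error_correction__(bits: list):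
--     for idx, val in enumerate(bits):
--         out = val
--         r = _decode(val, COLS0)
--         if r is not None and not r[1]:
--             out = CODE0[r[0]]
--         r = _decode(val, COLS1)
--         if r is not None and not r[1]:
--             out = CODE1[r[0]]
--         bits[idx] = out
--     return bits
-- ===== Notes on version B (the rewrite author's own statement) =====
-- stated objective: faster
-- what changed: Replaces the per-input character-by-character scan over all 32 codewords with a bit-parallel (bitap-style) pass: each codebook is preprocessed into 9 per-position char->16-bit-mask columns, and one left-to-right sweep over the input maintains exact-match and at-most-one-mismatch candidate masks in two integer registers.
import Mathlib
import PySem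

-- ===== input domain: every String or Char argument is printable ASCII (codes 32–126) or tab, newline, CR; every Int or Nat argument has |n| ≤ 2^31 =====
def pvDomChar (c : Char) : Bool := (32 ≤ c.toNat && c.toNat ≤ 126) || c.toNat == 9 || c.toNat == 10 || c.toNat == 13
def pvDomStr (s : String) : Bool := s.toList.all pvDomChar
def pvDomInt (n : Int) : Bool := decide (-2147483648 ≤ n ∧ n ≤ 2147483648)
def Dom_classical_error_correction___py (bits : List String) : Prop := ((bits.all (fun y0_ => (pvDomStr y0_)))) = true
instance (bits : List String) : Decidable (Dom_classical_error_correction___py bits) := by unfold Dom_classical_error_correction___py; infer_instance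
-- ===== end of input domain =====

-- B decodes by bit-parallel (bitap-style) candidate masks over 9 per-position char→mask
-- columns instead of scanning all 32 codewords per input.  Return-value equivalence;
-- both programs mutate the argument list in place the same way.

-- ===== PORT A =====
def pvCode0 : List String := ["000110101", "110110110", "110110101", "110000000", "000110110", "101101101", "011101101", "011011000", "011011011", "110000011", "000000000", "011101110", "101011011", "101101110", "000000011", "101011000"]
def pvCode1 : List String := ["010100111", "010010001", "111111111", "001001010", "111001010", "001111111", "100010010", "111111100", "100100100", "100010001", "001001001", "010010010", "100100111", "111001001", "001111100", "010100100"]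

-- 'diff = 0; for a,b in zip(val, j): if a!=b: diff += 1'
def pvDiffA (val j : String) : Int :=
  (val.toList.zip j.toList).foldl (fun diff ab => if ab.1 != ab.2 then diff + 1 else diff) 0

-- one 'for j in code: …' loop of A, with its two break cases; returns (bits[i] value, hmm)
def pvScanA (val cur : String) (code : List String) (hmm : Int) : String × Int :=
  match code with
  | [] => (cur, hmm)
  | j :: rest =>
      let diff := pvDiffA val j
      if diff == 0 then (cur, hmm + 1)
      else if diff == 1 then (j, hmm)
      else pvScanA val cur rest hmm

def classical_error_correction___py (bits : List String) : List String :=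
  ((List.range bits.length).foldl (fun (st : List String × Int) i =>
      let val := st.1.getD i ""
      let r0 := pvScanA val val pvCode0 st.2
      let st1 := st.1.set i r0.1
      let r1 := pvScanA val r0.1 pvCode1 r0.2
      (st1.set i r1.1, r1.2)) (bits, 0)).1

-- ===== PORT B =====
def pvFull : Nat := 65535

-- _columns: 9 per-position dicts char -> bitmask of codeword indices having that char there
def pvColumns (code : List String) : List (PySem.Dict Char Nat) :=
  code.zipIdx.foldl
    (fun cols wk =>
      ((cols.zip wk.1.toList).map
        (fun p => p.1.insert p.2 ((p.1.getD p.2 0) ||| (1 <<< wk.2)))) ++ cols.drop wk.1.toList.length)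
    (List.replicate 9 PySem.Dict.empty)

def pvCols0 : List (PySem.Dict Char Nat) := pvColumns pvCode0
def pvCols1 : List (PySem.Dict Char Nat) := pvColumns pvCode1

-- _decode: one sweep keeping the exact-match and ≤1-mismatch candidate masks
def pvDecode (val : String) (cols : List (PySem.Dict Char Nat)) : Option (Nat × Bool) :=
  let en := (val.toList.zip cols).foldl
      (fun (s : Nat × Nat) p =>
        let x := p.2.getD p.1 0
        (s.1 &&& x, (s.2 &&& x) ||| s.1))
      (pvFull, pvFull)
  match (List.range 16).find? (fun k => (en.2 >>> k) &&& 1 == 1) with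
  | none => none
  | some k => some (k, (en.1 >>> k) &&& 1 == 1)

def pvFixB (val : String) : String :=
  let out := val
  let out := match pvDecode val pvCols0 with
    | some r => if !r.2 then pvCode0.getD r.1 "" else out
    | none => out
  let out := match pvDecode val pvCols1 with
    | some r => if !r.2 then pvCode1.getD r.1 "" else out
    | none => out
  out

def classical_error_correction___py_alt (bits : List String) : List String :=
  (List.range bits.length).foldl (fun l idx => l.set idx (pvFixB (l.getD idx ""))) bits

-- ===== PRECONDITION & SPEC =====
def Spec_classical_error_correction___py (bits : List String) (out : List String) : Prop := out = classical_error_correction___py_alt bits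
instance (bits : List String) (out : List String) : Decidable (Spec_classical_error_correction___py bits out) := by unfold Spec_classical_error_correction___py; infer_instance

-- ===== CLAIM (what is proved, stated in full; the proofs are below) =====
def Claim_equal_classical_error_correction___py : Prop := ∀ (bits : List String), Dom_classical_error_correction___py bits → Spec_classical_error_correction___py bits (classical_error_correction___py bits)

-- ===== LEMMAS AND PROOFS =====

-- the per-element value A stores at bits[i]
def pvFixA (val : String) : String :=
  (pvScanA val (pvScanA val val pvCode0 0).1 pvCode1 0).1

-- number of mismatching positions of the zipped lists
def pvTdist (x y : List Char) : Nat := (x.zip y).countP (fun ab => ab.1 != ab.2)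

-- ---- A-side characterization ----
theorem pvScanA_fst (val cur : String) (code : List String) (h : Int) :
    (pvScanA val cur code h).1 = (pvScanA val cur code 0).1 := by
  induction code generalizing h with
  | nil => rfl
  | cons j rest ih => simp only [pvScanA]; split_ifs <;> simp [ih]

theorem pvDiffA_eq (val j : String) :
    pvDiffA val j = (pvTdist val.toList j.toList : Int) := by
  unfold pvDiffA pvTdist
  simpa using PySem.List.foldl_if_add_one (fun (ab : Char × Char) => ab.1 != ab.2) (val.toList.zip j.toList) 0

theorem pvScanA_char (val cur : String) (code : List String) :
    (pvScanA val cur code 0).1 =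
      (match code.find? (fun j => decide (pvTdist val.toList j.toList ≤ 1)) with
       | some j => if pvTdist val.toList j.toList = 0 then cur else j
       | none => cur) := by
  induction code with
  | nil => rfl
  | cons j rest ih =>
      simp only [pvScanA, List.find?_cons, pvDiffA_eq]
      by_cases h0 : pvTdist val.toList j.toList = 0
      · simp [h0]
      · by_cases h1 : pvTdist val.toList j.toList = 1
        · simp [h1]
        · have h2 : ¬ pvTdist val.toList j.toList ≤ 1 := by omega
          have e0 : ((pvTdist val.toList j.toList : Int) == 0) = false := by
            simp; omega
          have e1 : ((pvTdist val.toList j.toList : Int) == 1) = false := by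
            simp; omega
          simp only [e0, e1, Bool.false_eq_true, if_false, h2, decide_false]
          rw [pvScanA_fst, ih]

theorem pvStepA_fst (l : List String) (h : Int) (i : Nat) :
    ((l.set i (pvScanA (l.getD i "") (l.getD i "") pvCode0 h).1).set i
      (pvScanA (l.getD i "") (pvScanA (l.getD i "") (l.getD i "") pvCode0 h).1 pvCode1
        (pvScanA (l.getD i "") (l.getD i "") pvCode0 h).2).1)
    = l.set i (pvFixA (l.getD i "")) := by
  rw [List.set_set, pvScanA_fst _ _ _ ((pvScanA (l.getD i "") (l.getD i "") pvCode0 h).2),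
      pvScanA_fst _ _ _ h, pvFixA]

theorem pvFoldA_fst (n : Nat) (l : List String) (h : Int) :
    ((List.range n).foldl (fun (st : List String × Int) i =>
      let val := st.1.getD i ""
      let r0 := pvScanA val val pvCode0 st.2
      let st1 := st.1.set i r0.1
      let r1 := pvScanA val r0.1 pvCode1 r0.2
      (st1.set i r1.1, r1.2)) (l, h)).1
    = (List.range n).foldl (fun l i => l.set i (pvFixA (l.getD i ""))) l := by
  induction n generalizing l h with
  | zero => rfl
  | succ n ih =>
      rw [List.range_succ, List.foldl_append, List.foldl_append]
      simp only [List.foldl_cons, List.foldl_nil]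
      rw [pvStepA_fst, ih]

-- ---- B-side: the bitap fold invariant (exact / ≤1-mismatch registers, bit by bit) ----
theorem pvBitap (ms : List Nat) (E N : Nat) (k : Nat)
    (hEN : E.testBit k = true → N.testBit k = true) :
    (ms.foldl (fun (s : Nat × Nat) x => (s.1 &&& x, (s.2 &&& x) ||| s.1)) (E, N)).1.testBit k
        = (E.testBit k && ms.all (fun x => x.testBit k))
    ∧ (ms.foldl (fun (s : Nat × Nat) x => (s.1 &&& x, (s.2 &&& x) ||| s.1)) (E, N)).2.testBit k
        = ((N.testBit k && decide (ms.countP (fun x => !x.testBit k) = 0))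
            || (E.testBit k && decide (ms.countP (fun x => !x.testBit k) ≤ 1))) := by
  induction ms generalizing E N with
  | nil =>
      refine ⟨by simp, ?_⟩
      cases hE : E.testBit k
      · simp
      · simp [hEN hE]
  | cons x t ih =>
      have hEN' : (E &&& x).testBit k = true → ((N &&& x) ||| E).testBit k = true := by
        intro h
        rw [Nat.testBit_and] at h
        rw [Nat.testBit_or]
        cases hE : E.testBit k <;> simp [hE] at h ⊢
      obtain ⟨ihe, ihn⟩ := ih (E &&& x) ((N &&& x) ||| E) hEN'
      simp only [List.foldl_cons, List.all_cons, List.countP_cons]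
      refine ⟨?_, ?_⟩
      · rw [ihe]
        simp [Nat.testBit_and, Bool.and_assoc]
      · rw [ihn, Bool.eq_iff_iff]
        simp only [Nat.testBit_and, Nat.testBit_or]
        cases hx : x.testBit k <;> cases hE : E.testBit k <;> cases hN : N.testBit k <;>
          simp_all <;> omega

-- all-bits-match equals zero-mismatch-count
theorem pvAllCount (ms : List Nat) (k : Nat) :
    ms.all (fun x => x.testBit k) = decide (ms.countP (fun x => !x.testBit k) = 0) := by
  induction ms with
  | nil => simp
  | cons x t ih =>
      rw [List.all_cons, List.countP_cons, ih]
      cases hx : x.testBit k <;> simp [hx]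

-- a 2-entry literal dict looked up at an arbitrary char
theorem pvDict2 {a b : Nat} {c1 c2 : Char} (ch : Char) :
    (PySem.Dict.mk [(c1, a), (c2, b)]).getD ch 0
      = if ch = c1 then a else if ch = c2 then b else 0 := by
  rw [PySem.Dict.getD_eq_get?_getD, PySem.Dict.get?_mk_cons]
  by_cases h1 : ch = c1
  · simp [h1]
  · have : (c1 == ch) = false := by simpa using fun h => h1 h.symm
    rw [this]
    simp only [Bool.false_eq_true, if_false, if_neg h1]
    rw [PySem.Dict.get?_mk_cons]
    by_cases h2 : ch = c2
    · simp [h2]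
    · have : (c2 == ch) = false := by simpa using fun h => h2 h.symm
      rw [this]
      simp only [Bool.false_eq_true, if_false, if_neg h2]
      rfl

-- the evaluated column dicts of the two codebooks
def pvColsLit0 : List (PySem.Dict Char Nat) :=
  [PySem.Dict.mk [('0', 19921), ('1', 45614)], PySem.Dict.mk [('0', 62513), ('1', 3022)],
   PySem.Dict.mk [('0', 17951), ('1', 47584)], PySem.Dict.mk [('1', 10359), ('0', 55176)],
   PySem.Dict.mk [('1', 37271), ('0', 28264)], PySem.Dict.mk [('0', 17951), ('1', 47584)],
   PySem.Dict.mk [('1', 10359), ('0', 55176)], PySem.Dict.mk [('0', 34029), ('1', 31506)],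
   PySem.Dict.mk [('1', 21349), ('0', 44186)]]

def pvColsLit1 : List (PySem.Dict Char Nat) :=
  [PySem.Dict.mk [('0', 52267), ('1', 13268)], PySem.Dict.mk [('1', 43159), ('0', 22376)],
   PySem.Dict.mk [('0', 39747), ('1', 25788)], PySem.Dict.mk [('1', 53669), ('0', 11866)],
   PySem.Dict.mk [('0', 46361), ('1', 19174)], PySem.Dict.mk [('0', 39747), ('1', 25788)],
   PySem.Dict.mk [('1', 53669), ('0', 11866)], PySem.Dict.mk [('1', 6269), ('0', 59266)],
   PySem.Dict.mk [('1', 13863), ('0', 51672)]]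

theorem pvCols0_eq : pvCols0 = pvColsLit0 := by decide
theorem pvCols1_eq : pvCols1 = pvColsLit1 := by decide

-- closed bit facts: column masks encode exactly "codeword k has char c at position p"
theorem pvBitsFact0 : ((List.range 16).all (fun k => (List.range 9).all (fun p =>
    ((pvColsLit0.getD p PySem.Dict.empty).getD '0' 0).testBit k
        == (((pvCode0.getD k "").toList.getD p ' ') == '0')
    && (((pvColsLit0.getD p PySem.Dict.empty).getD '1' 0).testBit k
        == (((pvCode0.getD k "").toList.getD p ' ') == '1'))
    && ((((pvCode0.getD k "").toList.getD p ' ') == '0')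
        || (((pvCode0.getD k "").toList.getD p ' ') == '1'))))) = true := by decide

theorem pvBitsFact1 : ((List.range 16).all (fun k => (List.range 9).all (fun p =>
    ((pvColsLit1.getD p PySem.Dict.empty).getD '0' 0).testBit k
        == (((pvCode1.getD k "").toList.getD p ' ') == '0')
    && (((pvColsLit1.getD p PySem.Dict.empty).getD '1' 0).testBit k
        == (((pvCode1.getD k "").toList.getD p ' ') == '1'))
    && ((((pvCode1.getD k "").toList.getD p ' ') == '0')
        || (((pvCode1.getD k "").toList.getD p ' ') == '1'))))) = true := by decide

-- the Forall₂ column/codeword-character relation, for each k < 16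
def pvColRel (k : Nat) (col : PySem.Dict Char Nat) (w : Char) : Prop :=
  ∀ ch : Char, (col.getD ch 0).testBit k = (w == ch)

theorem pvColRel_of (cols : List (PySem.Dict Char Nat)) (code : List String) (k : Nat)
    (hk : k < 16)
    (hfact : ((List.range 16).all (fun k => (List.range 9).all (fun p =>
      ((cols.getD p PySem.Dict.empty).getD '0' 0).testBit k
          == (((code.getD k "").toList.getD p ' ') == '0')
      && (((cols.getD p PySem.Dict.empty).getD '1' 0).testBit k
          == (((code.getD k "").toList.getD p ' ') == '1'))
      && ((((code.getD k "").toList.getD p ' ') == '0')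
          || (((code.getD k "").toList.getD p ' ') == '1'))))) = true)
    (hlen : cols.length = 9) (hwlen : (code.getD k "").toList.length = 9)
    (h2 : ∀ p < 9, ∃ x y : Nat, cols.getD p PySem.Dict.empty = PySem.Dict.mk [('0', x), ('1', y)]
            ∨ cols.getD p PySem.Dict.empty = PySem.Dict.mk [('1', y), ('0', x)]) :
    List.Forall₂ (pvColRel k) cols ((code.getD k "").toList) := by
  rw [List.forall₂_iff_get]
  refine ⟨by rw [hlen, hwlen], ?_⟩
  intro i h1i h2i
  rw [hlen] at h1i
  have hfk := hfact
  simp only [List.all_eq_true, List.mem_range] at hfk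
  have h3 := hfk k hk i h1i
  simp only [Bool.and_eq_true, beq_iff_eq, Bool.or_eq_true] at h3
  obtain ⟨⟨e0, e1⟩, ebin⟩ := h3
  intro ch
  have hgetc : cols.get ⟨i, by rw [hlen]; exact h1i⟩ = cols.getD i PySem.Dict.empty := by
    rw [List.get_eq_getElem, List.getD_eq_getElem _ _ (by rw [hlen]; exact h1i)]
  have hgetw : ((code.getD k "").toList).get ⟨i, h2i⟩ = (code.getD k "").toList.getD i ' ' := by
    rw [List.get_eq_getElem, List.getD_eq_getElem _ _ h2i]
  rw [hgetc, hgetw]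
  obtain ⟨x, y, hd | hd⟩ := h2 i h1i
  all_goals {
    rw [hd] at e0 e1 ⊢
    by_cases hc0 : ch = '0'
    · subst hc0; rw [pvDict2] at e0 ⊢; simpa using e0
    · by_cases hc1 : ch = '1'
      · subst hc1; rw [pvDict2] at e1 ⊢; simpa using e1
      · rw [pvDict2]; rw [if_neg hc0]; rw [if_neg hc1]
        have hbf : ((code.getD k "").toList.getD i ' ' == ch) = false := by
          rcases ebin with hb | hb
          · rw [hb, beq_eq_false_iff_ne]; exact fun h => hc0 h.symm
          · rw [hb, beq_eq_false_iff_ne]; exact fun h => hc1 h.symm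
        rw [hbf]
        simp
  }

-- the mismatch count of the mask list equals the zip-truncated Hamming distance
theorem pvCnt_eq (vs : List Char) (cols : List (PySem.Dict Char Nat)) (ws : List Char)
    (k : Nat) (h : List.Forall₂ (pvColRel k) cols ws) :
    ((vs.zip cols).map (fun p => p.2.getD p.1 0)).countP (fun x => !x.testBit k)
      = (vs.zip ws).countP (fun p => p.1 != p.2) := by
  induction vs generalizing cols ws with
  | nil => simp
  | cons c vt ih =>
      cases h with
      | nil => simp
      | @cons col w colt wt hcw ht =>
          simp only [List.zip_cons_cons, List.map_cons, List.countP_cons]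
          rw [ih colt wt ht, hcw c]
          have : (w == c) = (c == w) := by
            by_cases h : c = w <;> simp [h, Ne.symm]
          rw [this]
          cases hcwb : c == w <;> simp [bne, hcwb]

-- first set bit over range 16 vs findIdx? over a 16-element codebook
theorem pvRangeFind (l : List String) (q : String → Bool) (d : String) :
    (List.range l.length).find? (fun k => q (l.getD k d)) = l.findIdx? q := by
  induction l with
  | nil => simp
  | cons a t ih =>
      rw [List.length_cons, List.range_succ_eq_map, List.find?_cons, List.findIdx?_cons]
      simp only [List.getD_cons_zero]
      cases hq : q a
      · simp only [Bool.false_eq_true, if_false]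
        rw [List.find?_map]
        have : ((fun k => q ((a :: t).getD k d)) ∘ (· + 1)) = fun k => q (t.getD k d) := by
          funext k; simp
        rw [this, ih]
      · simp

theorem pvFindIdxLt (code : List String) (q : String → Bool) (n : Nat)
    (h : code.findIdx? q = some n) : n < code.length := by
  induction code generalizing n with
  | nil => simp at h
  | cons j code ih =>
      rw [List.findIdx?_cons] at h
      cases hq : q j with
      | true => rw [hq] at h; simp at h; simp [List.length_cons]; omega
      | false =>
          rw [hq] at h
          simp only [Bool.false_eq_true, if_false] at h
          cases hf : code.findIdx? q with
          | none => rw [hf] at h; simp at h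
          | some m =>
              rw [hf] at h
              simp only [Option.map_some, Option.some.injEq] at h
              have := ih m hf
              simp [List.length_cons]
              omega

theorem pvFindEq (code : List String) (q : String → Bool) :
    code.find? q = (code.findIdx? q).map (fun n => code.getD n "") := by
  induction code with
  | nil => simp
  | cons j code ih =>
      rw [List.find?_cons, List.findIdx?_cons]
      cases hq : q j with
      | true => simp
      | false =>
          simp only [Bool.false_eq_true, if_false]
          rw [ih]
          cases hf : code.findIdx? q <;> simp

theorem pvFindCongr {α : Type} (l : List α) (p q : α → Bool) (h : ∀ x ∈ l, p x = q x) :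
    l.find? p = l.find? q := by
  induction l with
  | nil => rfl
  | cons a l ih =>
      rw [List.find?_cons, List.find?_cons, h a (by simp)]
      cases q a
      · exact ih (fun x hx => h x (by simp [hx]))
      · rfl

theorem pvTestBitFull (k : Nat) (hk : k < 16) : pvFull.testBit k = true := by
  have : pvFull = 2 ^ 16 - 1 := by norm_num [pvFull]
  rw [this, Nat.testBit_two_pow_sub_one]
  simpa using hk

theorem pvShiftTest (n k : Nat) : ((n >>> k) &&& 1 == 1) = n.testBit k := by
  rw [Nat.testBit_eq_decide_div_mod_eq, Nat.and_one_is_mod, Nat.shiftRight_eq_div_pow, Bool.eq_iff_iff]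
  simp

-- the per-codeword candidate/exact bits of one decode sweep
theorem pvDecode_char (val : String) (cols : List (PySem.Dict Char Nat)) (code : List String)
    (hrel : ∀ k < 16, List.Forall₂ (pvColRel k) cols ((code.getD k "").toList))
    (hclen : code.length = 16) :
    pvDecode val cols =
      (match code.findIdx? (fun w => decide (pvTdist val.toList w.toList ≤ 1)) with
       | none => none
       | some n => some (n, decide (pvTdist val.toList (code.getD n "").toList = 0))) := by
  simp only [pvDecode]
  have hfold : (val.toList.zip cols).foldl
      (fun (s : Nat × Nat) p => let x := p.2.getD p.1 0; (s.1 &&& x, (s.2 &&& x) ||| s.1))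
      (pvFull, pvFull)
    = ((val.toList.zip cols).map (fun p => p.2.getD p.1 0)).foldl
      (fun (s : Nat × Nat) x => (s.1 &&& x, (s.2 &&& x) ||| s.1)) (pvFull, pvFull) := by
    rw [List.foldl_map]
  rw [hfold]
  set ms := (val.toList.zip cols).map (fun p => p.2.getD p.1 0) with hms
  have hbit : ∀ k < 16,
      ((ms.foldl (fun (s : Nat × Nat) x => (s.1 &&& x, (s.2 &&& x) ||| s.1)) (pvFull, pvFull)).2.testBit k
        = decide (pvTdist val.toList ((code.getD k "").toList) ≤ 1))
      ∧ ((ms.foldl (fun (s : Nat × Nat) x => (s.1 &&& x, (s.2 &&& x) ||| s.1)) (pvFull, pvFull)).1.testBit k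
        = decide (pvTdist val.toList ((code.getD k "").toList) = 0)) := by
    intro k hk
    obtain ⟨he, hn⟩ := pvBitap ms pvFull pvFull k (fun h => h)
    have hcnt : ms.countP (fun x => !x.testBit k) = pvTdist val.toList ((code.getD k "").toList) := by
      rw [hms, pvCnt_eq val.toList cols _ k (hrel k hk), pvTdist]
    constructor
    · rw [hn, hcnt, pvTestBitFull k hk, Bool.true_and, Bool.true_and, Bool.eq_iff_iff]
      simp only [Bool.or_eq_true, decide_eq_true_eq]
      omega
    · rw [he, pvTestBitFull k hk, Bool.true_and, pvAllCount, hcnt]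
  have hq : (List.range 16).find?
        (fun k => ((ms.foldl (fun (s : Nat × Nat) x => (s.1 &&& x, (s.2 &&& x) ||| s.1)) (pvFull, pvFull)).2 >>> k) &&& 1 == 1)
      = (List.range 16).find? (fun k => decide (pvTdist val.toList ((code.getD k "").toList) ≤ 1)) := by
    apply pvFindCongr
    intro k hkmem
    rw [List.mem_range] at hkmem
    rw [pvShiftTest, (hbit k hkmem).1]
  rw [hq]
  have hr : (List.range 16).find? (fun k => decide (pvTdist val.toList ((code.getD k "").toList) ≤ 1))
      = code.findIdx? (fun w => decide (pvTdist val.toList w.toList ≤ 1)) := by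
    rw [← hclen, pvRangeFind code (fun w => decide (pvTdist val.toList w.toList ≤ 1)) ""]
  rw [hr]
  cases hf : code.findIdx? (fun w => decide (pvTdist val.toList w.toList ≤ 1)) with
  | none => rfl
  | some n =>
      have hn16 : n < 16 := by
        have := pvFindIdxLt code _ n hf
        omega
      simp only [pvShiftTest, (hbit n hn16).2]

theorem pvCols0_rel : ∀ k < 16, List.Forall₂ (pvColRel k) pvCols0 ((pvCode0.getD k "").toList) := by
  intro k hk
  rw [pvCols0_eq]
  refine pvColRel_of pvColsLit0 pvCode0 k hk pvBitsFact0 (by decide) ?_ ?_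
  · interval_cases k <;> decide
  · intro p hp
    interval_cases p
    · exact ⟨19921, 45614, Or.inl rfl⟩
    · exact ⟨62513, 3022, Or.inl rfl⟩
    · exact ⟨17951, 47584, Or.inl rfl⟩
    · exact ⟨55176, 10359, Or.inr rfl⟩
    · exact ⟨28264, 37271, Or.inr rfl⟩
    · exact ⟨17951, 47584, Or.inl rfl⟩
    · exact ⟨55176, 10359, Or.inr rfl⟩
    · exact ⟨34029, 31506, Or.inl rfl⟩
    · exact ⟨44186, 21349, Or.inr rfl⟩

theorem pvCols1_rel : ∀ k < 16, List.Forall₂ (pvColRel k) pvCols1 ((pvCode1.getD k "").toList) := by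
  intro k hk
  rw [pvCols1_eq]
  refine pvColRel_of pvColsLit1 pvCode1 k hk pvBitsFact1 (by decide) ?_ ?_
  · interval_cases k <;> decide
  · intro p hp
    interval_cases p
    · exact ⟨52267, 13268, Or.inl rfl⟩
    · exact ⟨22376, 43159, Or.inr rfl⟩
    · exact ⟨39747, 25788, Or.inl rfl⟩
    · exact ⟨11866, 53669, Or.inr rfl⟩
    · exact ⟨46361, 19174, Or.inl rfl⟩
    · exact ⟨39747, 25788, Or.inl rfl⟩
    · exact ⟨11866, 53669, Or.inr rfl⟩
    · exact ⟨59266, 6269, Or.inr rfl⟩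
    · exact ⟨51672, 13863, Or.inr rfl⟩

-- the two per-element updates agree
theorem pvFixA_eq_pvFixB (val : String) : pvFixA val = pvFixB val := by
  unfold pvFixA pvFixB
  rw [pvScanA_char, pvScanA_char,
      pvDecode_char val pvCols0 pvCode0 pvCols0_rel (by decide),
      pvDecode_char val pvCols1 pvCode1 pvCols1_rel (by decide),
      pvFindEq pvCode0, pvFindEq pvCode1]
  cases hf0 : pvCode0.findIdx? (fun w => decide (pvTdist val.toList w.toList ≤ 1)) with
  | none =>
      cases hf1 : pvCode1.findIdx? (fun w => decide (pvTdist val.toList w.toList ≤ 1)) with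
      | none => simp
      | some n =>
          simp only [Option.map_some]
          by_cases h0 : pvTdist val.toList ((pvCode1.getD n "").toList) = 0 <;> simp [h0]
  | some m =>
      cases hf1 : pvCode1.findIdx? (fun w => decide (pvTdist val.toList w.toList ≤ 1)) with
      | none =>
          simp only [Option.map_some]
          by_cases h0 : pvTdist val.toList ((pvCode0.getD m "").toList) = 0 <;> simp [h0]
      | some n =>
          simp only [Option.map_some]
          by_cases h0 : pvTdist val.toList ((pvCode0.getD m "").toList) = 0 <;>
            by_cases h1 : pvTdist val.toList ((pvCode1.getD n "").toList) = 0 <;>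
              simp [h0, h1]

theorem pv_outer_eq (bits : List String) :
    classical_error_correction___py bits = classical_error_correction___py_alt bits := by
  unfold classical_error_correction___py classical_error_correction___py_alt
  rw [pvFoldA_fst]
  simp only [pvFixA_eq_pvFixB]

-- ===== VERDICT (by name: the statement is the Claim_ definition above) =====
theorem classical_error_correction___py_spec : Claim_equal_classical_error_correction___py := by
  intro bits _
  unfold Spec_classical_error_correction___py
  exact pv_outer_eq bits
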